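-- pv_equiv track=rewrite | github.com/Rusl000n/Problem-solves | PythonSolving/DiophantineEquation.py | foo
-- ===== SOURCE A (Python) =====
-- def foo(a, b, c):
--     gcd, x0, y0 = extended_gcd(a, b)
--     if c % gcd != 0:
--         return 0, 0
--     x0 *= c // gcd
--     y0 *= c // gcd
--     if a != 0:
--         if (b // gcd) != 0:
--             k = -x0 // (b // gcd)
--         else:
--             k = 0
--         x = x0 + k*(b//gcd)
--         y = y0 -k*(a//gcd)
--         while x < 0:
--             x += b // gcd
--             y -= a // gcd
--         return x, y
--
-- def extended_gcd(a, b):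
--     if b == 0:
--         return a, 1, 0
--     else:
--         gcd, x1, y1 = extended_gcd(b, a % b)
--         x = y1
--         y = x1 - (a // b) * y1
--         return gcd, x, y
-- ===== SOURCE B (Python) =====
-- def foo(a, b, c):
--     # Iterative half extended Euclid: track only the x-coefficient; then
--     # closed-form normalization (mod) instead of A's k + while loop.
--     old_r, r = a, b
--     old_s, s = 1, 0
--     while r != 0:
--         q = old_r // r
--         old_r, r = r, old_r - q * r
--         old_s, s = s, old_s - q * s
--     g = old_r
--     if c % g != 0:
--         return 0, 0
--     if b == 0:
--         return c // g, 0
--     d = b // g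
--     x = (old_s * (c // g)) % d
--     return x, (c - a * x) // b
-- ===== Notes on version B (the rewrite author's own statement) =====
-- stated objective: alternative
-- what changed: Replaces the recursive extended_gcd plus k-scaling and while-loop normalization by an iterative half extended Euclid that tracks only the x-coefficient, computes the normalized x directly as a single Python mod, and recovers y in closed form as (c - a*x)//b.
-- outside the precondition, e.g. on foo(0, 1, 1): A returns None, B returns (0, 1); on foo(0, 0, 5): A raises ZeroDivisionError, B raises ZeroDivisionError; on foo(2, 0, -4): A does not finish within the time limit, B returns (-2, 0)
import Mathlib
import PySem

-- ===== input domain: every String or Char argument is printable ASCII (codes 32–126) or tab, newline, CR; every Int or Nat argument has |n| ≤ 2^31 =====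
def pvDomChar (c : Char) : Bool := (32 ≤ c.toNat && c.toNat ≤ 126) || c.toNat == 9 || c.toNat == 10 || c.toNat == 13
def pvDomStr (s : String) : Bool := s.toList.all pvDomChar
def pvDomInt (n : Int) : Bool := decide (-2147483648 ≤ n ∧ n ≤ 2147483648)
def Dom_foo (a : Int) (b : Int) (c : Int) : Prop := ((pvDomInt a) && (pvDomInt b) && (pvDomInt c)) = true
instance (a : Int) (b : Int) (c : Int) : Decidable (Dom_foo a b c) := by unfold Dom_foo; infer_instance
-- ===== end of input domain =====

-- B replaces the recursive extended_gcd + k-scaling + while-loop by an iterative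
-- half extended Euclid (x-coefficient only), a single mod for the normalized x,
-- and a closed-form y = (c - a*x) // b; objective: alternative (same cost).


-- termination helper for both Euclid recursions (cited by name in decreasing_by)
theorem pvModNatAbsLt (a b : Int) (hb : b ≠ 0) :
    (PySem.Int.mod a b).natAbs < b.natAbs := by
  rcases lt_trichotomy b 0 with h | h | h
  · have := PySem.Int.mod_neg_bounds a h
    omega
  · exact absurd h hb
  · have h1 := PySem.Int.mod_nonneg a h
    have h2 := PySem.Int.mod_lt a h
    omega

-- ===== PORT A =====
-- extended_gcd(a, b) from the Python source, recursive
def extendedGcd (a b : Int) : Int × Int × Int :=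
  if hb : b = 0 then (a, 1, 0)
  else
    let r := extendedGcd b (PySem.Int.mod a b)
    (r.1, r.2.2, r.2.1 - PySem.Int.floordiv a b * r.2.2)
termination_by b.natAbs
decreasing_by exact pvModNatAbsLt a b hb

-- the 'while x < 0: x += db; y -= da' loop; fuel makes it total (under Pre_foo the
-- loop terminates within the fuel supplied at the call site)
def whileAdjust (db da : Int) : Nat → Int → Int → Int × Int
  | 0, x, y => (x, y)
  | n+1, x, y => if x < 0 then whileAdjust db da n (x + db) (y - da) else (x, y)

def foo (a : Int) (b : Int) (c : Int) : Int × Int :=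
  let e := extendedGcd a b
  let g := e.1
  if PySem.Int.mod c g ≠ 0 then (0, 0)
  else
    let x0 := e.2.1 * PySem.Int.floordiv c g
    let y0 := e.2.2 * PySem.Int.floordiv c g
    if a ≠ 0 then
      let d := PySem.Int.floordiv b g
      let k := if d ≠ 0 then PySem.Int.floordiv (-x0) d else 0
      let x := x0 + k * d
      let y := y0 - k * PySem.Int.floordiv a g
      whileAdjust d (PySem.Int.floordiv a g) (x.natAbs + 1) x y
    else (0, 0)  -- Python's implicit 'return None'; unreachable under Pre_foo

-- ===== PORT B =====
-- iterative half extended Euclid: the (old_r, r) and (old_s, s) pairs only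
def egcdLoop (or' r os s : Int) : Int × Int :=
  if hr : r = 0 then (or', os)
  else
    egcdLoop r (or' - PySem.Int.floordiv or' r * r) s (os - PySem.Int.floordiv or' r * s)
termination_by r.natAbs
decreasing_by
  have h := PySem.Int.floordiv_mul_add_mod or' r
  have he : or' - PySem.Int.floordiv or' r * r = PySem.Int.mod or' r := by omega
  rw [he]; exact pvModNatAbsLt or' r hr

def foo_alt (a : Int) (b : Int) (c : Int) : Int × Int :=
  let p := egcdLoop a b 1 0
  let g := p.1
  if PySem.Int.mod c g ≠ 0 then (0, 0)
  else if b = 0 then (PySem.Int.floordiv c g, 0)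
  else
    let d := PySem.Int.floordiv b g
    let x := PySem.Int.mod (p.2 * PySem.Int.floordiv c g) d
    (x, PySem.Int.floordiv (c - a * x) b)

-- ===== PRECONDITION & SPEC =====
-- Pre_foo excludes exactly the inputs where Python A does not return a pair:
-- a = 0 with b = 0 raises ZeroDivisionError; a = 0 with b | c falls through and
-- returns None; b = 0, a ≠ 0, a | c with a*c < 0 loops forever (x < 0, step 0).
def Pre_foo (a : Int) (b : Int) (c : Int) : Prop :=
  (a = 0 → b ≠ 0 ∧ ¬ (b ∣ c)) ∧ (b = 0 → ¬ (a ∣ c ∧ a * c < 0))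
instance (a : Int) (b : Int) (c : Int) : Decidable (Pre_foo a b c) := by
  unfold Pre_foo; infer_instance

def pvWitness_foo : Int × Int × Int := (6, 4, 10)

def Spec_foo (a : Int) (b : Int) (c : Int) (out : Int × Int) : Prop := out = foo_alt a b c
instance (a : Int) (b : Int) (c : Int) (out : Int × Int) : Decidable (Spec_foo a b c out) := by
  unfold Spec_foo; infer_instance

-- ===== CLAIM (what is proved, stated in full; the proofs are below) =====
def Claim_equal_foo : Prop :=
  ∀ (a : Int) (b : Int) (c : Int), Dom_foo a b c → Pre_foo a b c → Spec_foo a b c (foo a b c)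

-- ===== LEMMAS AND PROOFS =====

-- exact division by PySem floordiv
theorem pvFloordivMulCancel (g t : Int) (hg : g ≠ 0) :
    PySem.Int.floordiv (g * t) g = t := by
  have hmod : PySem.Int.mod (g * t) g = 0 :=
    (PySem.Int.mod_eq_zero_iff_dvd _ _).2 ⟨t, rfl⟩
  have h := PySem.Int.floordiv_mul_add_mod (g * t) g
  rw [hmod] at h
  have h2 : (PySem.Int.floordiv (g * t) g - t) * g = 0 := by linarith [h]
  rcases mul_eq_zero.1 h2 with h' | h'
  · omega
  · exact absurd h' hg

-- B's loop computes A's recursive egcd (gcd, and a linear combination of the coefficients)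
theorem egcdLoop_eq (or' r os s : Int) :
    egcdLoop or' r os s =
      ((extendedGcd or' r).1,
       os * (extendedGcd or' r).2.1 + s * (extendedGcd or' r).2.2) := by
  induction or', r, os, s using egcdLoop.induct with
  | case1 or' os s =>
      rw [egcdLoop, extendedGcd]
      simp
  | case2 or' r os s hr ih =>
      rw [egcdLoop, extendedGcd]
      simp only [hr, dite_false]
      have hm : or' - PySem.Int.floordiv or' r * r = PySem.Int.mod or' r := by
        have := PySem.Int.floordiv_mul_add_mod or' r
        omega
      rw [hm] at ih ⊢
      rw [ih]
      refine Prod.ext rfl ?_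
      ring

-- Bezout identity for A's egcd
theorem egcd_bezout (a b : Int) :
    a * (extendedGcd a b).2.1 + b * (extendedGcd a b).2.2 = (extendedGcd a b).1 := by
  induction a, b using extendedGcd.induct with
  | case1 a => rw [extendedGcd]; simp
  | case2 a b hb ih =>
      rw [extendedGcd]
      simp only [hb, dite_false]
      have h := PySem.Int.floordiv_mul_add_mod a b
      linear_combination ih - (extendedGcd b (PySem.Int.mod a b)).2.2 * h

-- gcd divides both arguments and has the sign of b (for b ≠ 0)
theorem egcd_props (a b : Int) :
    b ≠ 0 →
      (extendedGcd a b).1 ∣ a ∧ (extendedGcd a b).1 ∣ b ∧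
      (0 < b → 0 < (extendedGcd a b).1) ∧ (b < 0 → (extendedGcd a b).1 < 0) := by
  induction a, b using extendedGcd.induct with
  | case1 a => intro h; exact absurd rfl h
  | case2 a b hb ih =>
      intro _
      rw [extendedGcd]
      simp only [hb, dite_false]
      by_cases hm : PySem.Int.mod a b = 0
      · have hdvd : b ∣ a := (PySem.Int.mod_eq_zero_iff_dvd a b).1 hm
        rw [hm, extendedGcd]
        simp only [dite_true]
        exact ⟨hdvd, dvd_refl b, fun h => h, fun h => h⟩
      · obtain ⟨h1, h2, h3, h4⟩ := ih hm
        have hA := PySem.Int.floordiv_mul_add_mod a b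
        obtain ⟨u, hu⟩ := h1
        obtain ⟨v, hv⟩ := h2
        refine ⟨⟨PySem.Int.floordiv a b * u + v,
            by linear_combination (PySem.Int.floordiv a b) * hu + hv - hA⟩,
          ⟨u, hu⟩, ?_, ?_⟩
        · intro hbpos
          have := PySem.Int.mod_nonneg a hbpos
          exact h3 (by omega)
        · intro hbneg
          have := PySem.Int.mod_neg_bounds a hbneg
          exact h4 (by omega)

-- ===== VERDICT =====
theorem foo_spec : Claim_equal_foo := by
  intro a b c _ hpre
  unfold Spec_foo
  simp only [foo, foo_alt]
  rw [egcdLoop_eq]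
  rcases he : extendedGcd a b with ⟨g, x0, y0⟩
  simp only [one_mul, zero_mul, add_zero]
  by_cases hmod : PySem.Int.mod c g = 0
  · simp only [hmod, ne_eq, not_true_eq_false, if_false]
    have hgc : g ∣ c := (PySem.Int.mod_eq_zero_iff_dvd c g).1 hmod
    by_cases ha : a = 0
    · -- excluded by Pre_: Pre gives b ≠ 0 and ¬ b ∣ c, but then g = b divides c
      obtain ⟨hb, hbc⟩ := hpre.1 ha
      exfalso
      apply hbc
      subst ha
      have hd0 : PySem.Int.floordiv 0 b = 0 := by
        have := pvFloordivMulCancel b 0 hb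
        simpa using this
      have h0 : PySem.Int.mod 0 b = 0 := by
        have := PySem.Int.floordiv_mul_add_mod 0 b
        rw [hd0] at this
        omega
      have h00 : extendedGcd (0:Int) b = (b, 0, 1) := by
        rw [extendedGcd]
        simp only [hb, dite_false, h0]
        rw [extendedGcd]
        simp
      rw [h00] at he
      injection he with h1 _
      rw [h1]
      exact hgc
    · -- a ≠ 0: A takes the real branch
      simp only [ha, not_false_eq_true, if_true]
      have hbez : a * x0 + b * y0 = g := by
        have h := egcd_bezout a b
        rw [he] at h
        exact h
      obtain ⟨cc, hcc⟩ := hgc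
      by_cases hb : b = 0
      · -- b = 0: g = a, x0 = 1, y0 = 0; c//a ≥ 0 under Pre_, loop exits at once
        subst hb
        have hea : extendedGcd a (0:Int) = (a, 1, 0) := by rw [extendedGcd]; simp
        rw [hea] at he
        injection he with h1 h23
        injection h23 with h2 h3
        subst h1 h2 h3
        have hfc : PySem.Int.floordiv c a = cc := by
          rw [hcc]; exact pvFloordivMulCancel a cc ha
        have hd0 : PySem.Int.floordiv (0:Int) a = 0 := by
          have := pvFloordivMulCancel a 0 ha
          simpa using this
        have hccnn : 0 ≤ cc := by
          by_contra h
          push_neg at h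
          have hac : ¬ (a ∣ c ∧ a * c < 0) := hpre.2 rfl
          apply hac
          refine ⟨⟨cc, hcc⟩, ?_⟩
          rw [hcc]
          rcases lt_trichotomy a 0 with hg | hg | hg
          · nlinarith [mul_pos_of_neg_of_neg hg hg]
          · exact absurd hg ha
          · nlinarith [mul_pos hg hg]
        rw [hfc, hd0]
        simp only [ne_eq, not_true_eq_false, if_false, mul_zero, one_mul,
          add_zero, zero_mul, sub_zero]
        have hnn : ¬ cc < 0 := by omega
        rw [whileAdjust]
        simp [hnn]
      · -- b ≠ 0: the main case
        have hprops := egcd_props a b hb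
        rw [he] at hprops
        have hga : g ∣ a := by simpa using hprops.1
        have hgb : g ∣ b := by simpa using hprops.2.1
        have hpos : 0 < b → 0 < g := by simpa using hprops.2.2.1
        have hneg : b < 0 → g < 0 := by simpa using hprops.2.2.2
        have hg0 : g ≠ 0 := by
          rcases lt_trichotomy b 0 with h | h | h
          · exact ne_of_lt (hneg h)
          · exact absurd h hb
          · exact ne_of_gt (hpos h)
        obtain ⟨da, hda⟩ := hga
        obtain ⟨db, hdb⟩ := hgb
        have hfa : PySem.Int.floordiv a g = da := by rw [hda]; exact pvFloordivMulCancel g da hg0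
        have hfb : PySem.Int.floordiv b g = db := by rw [hdb]; exact pvFloordivMulCancel g db hg0
        have hfc : PySem.Int.floordiv c g = cc := by rw [hcc]; exact pvFloordivMulCancel g cc hg0
        have hdbpos : 0 < db := by
          rcases lt_trichotomy b 0 with h | h | h
          · have hgneg := hneg h
            nlinarith [hdb]
          · exact absurd h hb
          · have hgpos := hpos h
            nlinarith [hdb]
        have hdbne : db ≠ 0 := ne_of_gt hdbpos
        rw [hfa, hfb, hfc]
        simp only [hb, if_false, hdbne, ne_eq, not_false_eq_true, if_true]
        set X := x0 * cc with hXdef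
        set Y := y0 * cc with hYdef
        have hsol : a * X + b * Y = c := by
          rw [hXdef, hYdef, hcc]
          linear_combination cc * hbez
        set K := PySem.Int.floordiv (-X) db with hKdef
        set M := PySem.Int.mod X db with hMdef
        have hM0 : 0 ≤ M := PySem.Int.mod_nonneg X hdbpos
        have hM1 : M < db := PySem.Int.mod_lt X hdbpos
        have hMq := PySem.Int.floordiv_mul_add_mod X db
        set N := PySem.Int.mod (-X) db with hNdef
        have hN0 : 0 ≤ N := PySem.Int.mod_nonneg (-X) hdbpos
        have hN1 : N < db := PySem.Int.mod_lt (-X) hdbpos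
        have hNq := PySem.Int.floordiv_mul_add_mod (-X) db
        have hx1 : X + K * db = -N := by rw [hKdef, hNdef]; omega
        have hcross : a * db - b * da = 0 := by rw [hda, hdb]; ring
        rw [hx1]
        by_cases hNz : N = 0
        · -- x is already 0; M = 0 too, and y = (c - a*0) // b
          have hdvd : db ∣ X := by
            have hdvd' : db ∣ -X := (PySem.Int.mod_eq_zero_iff_dvd (-X) db).1 (hNdef ▸ hNz)
            exact dvd_neg.1 hdvd'
          have hMz : M = 0 := by rw [hMdef]; exact (PySem.Int.mod_eq_zero_iff_dvd X db).2 hdvd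
          rw [hNz]
          simp only [neg_zero, Int.natAbs_zero]
          rw [whileAdjust]
          simp only [lt_self_iff_false, if_false]
          have hy : c - a * M = b * (Y - K * da) := by
            linear_combination (-1) * hsol + a * hx1 - K * hcross - a * hNz - a * hMz
          refine Prod.ext ?_ ?_
          · simp [hMz]
          · simp only []
            rw [hy, pvFloordivMulCancel b _ hb]
        · -- x = -N < 0: exactly one loop iteration, landing on M = db - N
          have hMN : M + N = db := by
            have hsum : (PySem.Int.floordiv X db + PySem.Int.floordiv (-X) db) * db
                = -(M + N) := by
              linear_combination hMq + hNq
            set S := PySem.Int.floordiv X db + PySem.Int.floordiv (-X) db with hS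
            have hNpos : 0 < N := by omega
            have h1 : S < 0 := by
              by_contra hcon
              push_neg at hcon
              nlinarith [mul_nonneg hcon (le_of_lt hdbpos)]
            have h2 : -2 < S := by
              by_contra hcon
              push_neg at hcon
              nlinarith [mul_le_mul_of_nonneg_right hcon (le_of_lt hdbpos)]
            have hSm1 : S = -1 := by omega
            rw [hSm1] at hsum
            omega
          obtain ⟨m, hmfuel⟩ : ∃ m : Nat, (-N : Int).natAbs = m + 1 :=
            ⟨(-N:Int).natAbs - 1, by omega⟩
          rw [hmfuel]
          rw [whileAdjust]
          have hneg1 : (-N : Int) < 0 := by omega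
          simp only [hneg1, if_true]
          have hstop : ¬ (-N + db < 0) := by omega
          rw [whileAdjust]
          simp only [hstop, if_false]
          refine Prod.ext ?_ ?_
          · simp only []
            omega
          · simp only []
            have hy : c - a * M = b * (Y - K * da - da) := by
              linear_combination (-1) * hsol - a * hMN + a * hx1 - (1 + K) * hcross
            rw [hy, pvFloordivMulCancel b _ hb]
  · simp [hmod]
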